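-- pv_equiv track=rewrite | github.com/wspopensource2023/WSP | backend/apiservice/third_party/scrape.py | choose_candidates
-- ===== SOURCE A (Python) =====
-- def choose_candidates(items, min_char, max_char):
--     scores = []
--     for index, item in enumerate(items):
--         score = 0
--         if item:
--             if len(item) >= min_char:
--                 score += 1
--             if len(item) <= max_char:
--                 score += 1
--         scores.append(score)
--     return items[scores.index(max(scores))]
-- ===== SOURCE B (Python) =====
-- def choose_candidates(items, min_char, max_char):
--     best_score = -1
--     best_item = None
--     for item in items:
--         score = 0
--         if item:
--             if len(item) >= min_char:
--                 score += 1
--             if len(item) <= max_char: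
--                 score += 1
--         if score > best_score:
--             best_score = score
--             best_item = item
--     if best_item is None:
--         raise ValueError("choose_candidates() arg is an empty sequence")
--     return best_item
-- ===== Notes on version B (the rewrite author's own statement) =====
-- stated objective: simpler
-- what changed: single-pass running argmax with strict > (first max wins) instead of building a scores list and then scanning it three times (max, index, subscript)
import Mathlib
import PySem

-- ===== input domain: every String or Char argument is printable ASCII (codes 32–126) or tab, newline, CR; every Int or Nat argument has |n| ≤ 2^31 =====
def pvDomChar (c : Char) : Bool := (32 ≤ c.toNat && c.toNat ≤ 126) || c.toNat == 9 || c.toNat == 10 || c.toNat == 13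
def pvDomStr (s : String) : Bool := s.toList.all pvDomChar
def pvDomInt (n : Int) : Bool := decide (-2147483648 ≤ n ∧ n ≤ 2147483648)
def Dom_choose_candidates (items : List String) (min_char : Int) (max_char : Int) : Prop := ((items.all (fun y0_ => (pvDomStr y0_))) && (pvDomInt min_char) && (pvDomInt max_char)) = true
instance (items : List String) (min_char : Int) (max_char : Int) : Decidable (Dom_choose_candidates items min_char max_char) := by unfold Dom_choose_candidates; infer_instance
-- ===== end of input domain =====

-- B replaces A's build-a-scores-list-then-scan-it-three-times (max, index, subscript) by a
-- single running-argmax pass with strict '>' (first maximum wins); objective: simpler.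

-- ===== PORT A =====
-- loop body's score of one item: 0 for falsy item, else +1 for len>=min_char, +1 for len<=max_char
def pvScoreA (item : String) (min_char : Int) (max_char : Int) : Int :=
  if item ≠ "" then
    (if PySem.Str.len item ≥ min_char then (1 : Int) else 0)
      + (if PySem.Str.len item ≤ max_char then 1 else 0)
  else 0

def choose_candidates (items : List String) (min_char : Int) (max_char : Int) : String :=
  let scores := items.foldl (fun acc item => acc ++ [pvScoreA item min_char max_char]) []
  -- items[scores.index(max(scores))]; each step that would raise is none, excluded by Pre_
  ((PySem.List.max? scores (fun y => y)).bind fun m =>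
    (PySem.List.index? scores m).bind fun i =>
      PySem.List.pyGet? items ((i : Nat) : Int)).getD ""

-- ===== PORT B =====
def pvScoreB (item : String) (min_char : Int) (max_char : Int) : Int :=
  if item ≠ "" then
    (if PySem.Str.len item ≥ min_char then (1 : Int) else 0)
      + (if PySem.Str.len item ≤ max_char then 1 else 0)
  else 0

def choose_candidates_alt (items : List String) (min_char : Int) (max_char : Int) : String :=
  let r := items.foldl
    (fun (st : Int × Option String) item =>
      let score := pvScoreB item min_char max_char
      if score > st.1 then (score, some item) else st)
    ((-1 : Int), (none : Option String))
  -- r.2 = none means best_item is None: Source B raises ValueError there, excluded by Pre_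
  r.2.getD ""

-- ===== PRECONDITION & SPEC =====
-- Pre_ excludes only the empty list, on which BOTH Pythons raise ValueError.
def Pre_choose_candidates (items : List String) (min_char : Int) (max_char : Int) : Prop := items ≠ []
instance (items : List String) (min_char : Int) (max_char : Int) : Decidable (Pre_choose_candidates items min_char max_char) := by unfold Pre_choose_candidates; infer_instance
def pvWitness_choose_candidates : List String × Int × Int := (["ab", "", "abcd"], 1, 3)

def Spec_choose_candidates (items : List String) (min_char : Int) (max_char : Int) (out : String) : Prop := out = choose_candidates_alt items min_char max_char
instance (items : List String) (min_char : Int) (max_char : Int) (out : String) : Decidable (Spec_choose_candidates items min_char max_char out) := by unfold Spec_choose_candidates; infer_instance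

-- ===== CLAIM (what is proved, stated in full; the proofs are below) =====
def Claim_equal_choose_candidates : Prop := ∀ (items : List String) (min_char : Int) (max_char : Int), Dom_choose_candidates items min_char max_char → Pre_choose_candidates items min_char max_char → Spec_choose_candidates items min_char max_char (choose_candidates items min_char max_char)

-- ===== LEMMAS AND PROOFS =====

theorem pvScoreA_nonneg (item : String) (mn mx : Int) : 0 ≤ pvScoreA item mn mx := by
  unfold pvScoreA; split_ifs <;> omega

-- B's loop step, named (definitionally equal to the lambda in choose_candidates_alt)
def pvStepB (mn mx : Int) (st : Int × Option String) (item : String) : Int × Option String :=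
  if pvScoreA item mn mx > st.1 then (pvScoreA item mn mx, some item) else st

-- running max of the scores of l, floored at s
def pvMax (l : List String) (mn mx s : Int) : Int :=
  l.foldl (fun a x => max a (pvScoreA x mn mx)) s

theorem pvMax_eq_foldl_map (l : List String) (mn mx s : Int) :
    pvMax l mn mx s = (l.map (fun x => pvScoreA x mn mx)).foldl max s := by
  simp [pvMax, List.foldl_map]

-- B's loop computes the running max together with the FIRST element attaining it
theorem foldB_spec (mn mx : Int) (l : List String) : ∀ (s : Int) (b : Option String),
    l.foldl (pvStepB mn mx) (s, b)
    = (pvMax l mn mx s,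
       if s < pvMax l mn mx s
       then l.find? (fun x => pvScoreA x mn mx == pvMax l mn mx s)
       else b) := by
  induction l with
  | nil => intro s b; simp [pvMax]
  | cons x xs ih =>
    intro s b
    have hcons : ∀ t, pvMax (x :: xs) mn mx t = pvMax xs mn mx (max t (pvScoreA x mn mx)) :=
      fun t => rfl
    have hle : pvScoreA x mn mx ≤ pvMax xs mn mx (pvScoreA x mn mx) :=
      (PySem.List.le_foldl_max_int xs (fun y => pvScoreA y mn mx) _).1
    rw [List.foldl_cons]
    by_cases h : pvScoreA x mn mx > s
    · rw [show pvStepB mn mx (s, b) x = (pvScoreA x mn mx, some x) from by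
        simp [pvStepB, h]]
      rw [ih, hcons, show max s (pvScoreA x mn mx) = pvScoreA x mn mx from by omega]
      rcases lt_or_eq_of_le hle with hlt2 | heq
      · rw [if_pos hlt2, if_pos (lt_trans h hlt2),
           List.find?_cons_of_neg (by simp; omega)]
      · rw [← heq, if_neg (lt_irrefl _), if_pos h,
           List.find?_cons_of_pos (by simp)]
    · rw [show pvStepB mn mx (s, b) x = (s, b) from by simp [pvStepB, h]]
      rw [ih, hcons, show max s (pvScoreA x mn mx) = s from by omega]
      by_cases hlt : s < pvMax xs mn mx s
      · rw [if_pos hlt, if_pos hlt,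
           List.find?_cons_of_neg (by simp; omega)]
      · rw [if_neg hlt, if_neg hlt]

-- first index of m in (map f l), then subscripting l there = first element of l with f-value m
theorem pyGet_index_find (f : String → Int) (l : List String) (m : Int) (hm : m ∈ l.map f) :
    (PySem.List.index? (l.map f) m).bind
        (fun i => PySem.List.pyGet? l ((i : Nat) : Int))
      = l.find? (fun x => f x == m) := by
  induction l with
  | nil => simp at hm
  | cons x xs ih =>
    by_cases h : f x = m
    · rw [List.map_cons, h, PySem.List.index?_cons_self]
      simp [PySem.List.pyGet?_natCast, List.find?_cons_of_pos, h]
    · have hm' : m ∈ xs.map f := by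
        rcases List.mem_map.mp hm with ⟨y, hy, hfy⟩
        rcases List.mem_cons.mp hy with h1 | h1
        · exact absurd (h1 ▸ hfy) h
        · exact List.mem_map.mpr ⟨y, h1, hfy⟩
      rw [List.map_cons, PySem.List.index?_cons_of_ne (List.map f xs) h,
          List.find?_cons_of_neg (by simp [h]), ← ih hm']
      rcases hi : PySem.List.index? (xs.map f) m with _ | i
      · rfl
      · simp only [Option.map_some, Option.bind_some, PySem.List.pyGet?_natCast]
        simp

-- ===== VERDICT (by name: the statement is the Claim_ definition above) =====
theorem choose_candidates_spec : Claim_equal_choose_candidates := by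
  intro items mn mx _ hpre
  unfold Spec_choose_candidates
  cases items with
  | nil => exact absurd rfl hpre
  | cons x xs =>
    have hx0 := pvScoreA_nonneg x mn mx
    have hconsM : pvMax (x :: xs) mn mx (-1) = pvMax xs mn mx (pvScoreA x mn mx) := by
      show pvMax xs mn mx (max (-1) (pvScoreA x mn mx)) = _
      rw [show max (-1 : Int) (pvScoreA x mn mx) = pvScoreA x mn mx from by omega]
    have hxle : pvScoreA x mn mx ≤ pvMax xs mn mx (pvScoreA x mn mx) :=
      (PySem.List.le_foldl_max_int xs (fun y => pvScoreA y mn mx) _).1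
    have hlt : (-1 : Int) < pvMax (x :: xs) mn mx (-1) := by rw [hconsM]; omega
    have hmem : pvMax (x :: xs) mn mx (-1) ∈ (x :: xs).map (fun y => pvScoreA y mn mx) := by
      rw [hconsM, pvMax_eq_foldl_map]
      rcases PySem.List.foldl_max_mem (xs.map (fun y => pvScoreA y mn mx)) (pvScoreA x mn mx)
        with h | h
      · rw [h]; simp
      · simp [h]
    have hmax? : PySem.List.max? ((x :: xs).map (fun y => pvScoreA y mn mx)) (fun y => y)
        = some (pvMax (x :: xs) mn mx (-1)) := by
      rw [List.map_cons, PySem.List.max?_id_cons, hconsM, pvMax_eq_foldl_map]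
    have hB : choose_candidates_alt (x :: xs) mn mx
        = ((x :: xs).find?
            (fun y => pvScoreA y mn mx == pvMax (x :: xs) mn mx (-1))).getD "" := by
      show ((x :: xs).foldl (pvStepB mn mx) ((-1 : Int), (none : Option String))).2.getD "" = _
      rw [foldB_spec, if_pos hlt]
    rw [hB]
    show ((PySem.List.max? ((x :: xs).foldl
            (fun acc item => acc ++ [pvScoreA item mn mx]) []) (fun y => y)).bind fun m =>
          (PySem.List.index? ((x :: xs).foldl
            (fun acc item => acc ++ [pvScoreA item mn mx]) []) m).bind fun i =>
            PySem.List.pyGet? (x :: xs) ((i : Nat) : Int)).getD "" = _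
    rw [PySem.List.foldl_append_singleton_eq_map, List.nil_append, hmax?, Option.bind_some,
        pyGet_index_find (fun y => pvScoreA y mn mx) (x :: xs) _ hmem]
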